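-- pv_equiv track=rewrite | github.com/yemuc1210/go_algorithm_practice | src/lccup/LCP30.MagicTower/app.py | magicTower
-- ===== SOURCE A (Python) =====
-- from typing import List
--
-- def magicTower(nums: List[int]) -> int:
--     if sum(nums) < 0:
--         return -1
--     count = 0
--     blood = 1
--     n = len(nums)
--
--     monster = []
--     for i in nums:
--         if i < 0:
--             monster.append(i)
--         blood += i
--         while(blood < 1):
--             count += 1
--             blood -= min(monster)
--             monster.remove(min(monster))
--     return count
-- ===== SOURCE B (Python) =====
-- from typing import List
--
-- # Leftist min-heap as nested tuples: (value, rank, left, right); None = empty tree.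
-- def _rank(h):
--     return h[1] if h is not None else 0
--
-- def _make(v, l, m):
--     # node with value v and subtrees l, m, shorter rank on the right
--     if _rank(l) < _rank(m):
--         l, m = m, l
--     return (v, _rank(m) + 1, l, m)
--
-- def _merge(a, b):
--     if a is None:
--         return b
--     if b is None:
--         return a
--     if b[0] < a[0]:
--         a, b = b, a
--     return _make(a[0], a[2], _merge(a[3], b))
--
-- def magicTower(nums: List[int]) -> int:
--     if sum(nums) < 0:
--         return -1
--     count = 0
--     blood = 1
--     heap = None
--     for i in nums:
--         if i < 0:
--             heap = _merge(heap, (i, 1, None, None))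
--         blood += i
--         while blood < 1:
--             count += 1
--             blood -= heap[0]
--             heap = _merge(heap[2], heap[3])
--     return count
-- ===== Notes on version B (the rewrite author's own statement) =====
-- stated objective: alternative
-- what changed: Replaces A's Python-list multiset with repeated min()/remove() linear scans by a hand-rolled leftist min-heap (merge-based priority queue), keeping the same greedy: defer the worst monster seen whenever blood drops below 1.
import Mathlib
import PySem

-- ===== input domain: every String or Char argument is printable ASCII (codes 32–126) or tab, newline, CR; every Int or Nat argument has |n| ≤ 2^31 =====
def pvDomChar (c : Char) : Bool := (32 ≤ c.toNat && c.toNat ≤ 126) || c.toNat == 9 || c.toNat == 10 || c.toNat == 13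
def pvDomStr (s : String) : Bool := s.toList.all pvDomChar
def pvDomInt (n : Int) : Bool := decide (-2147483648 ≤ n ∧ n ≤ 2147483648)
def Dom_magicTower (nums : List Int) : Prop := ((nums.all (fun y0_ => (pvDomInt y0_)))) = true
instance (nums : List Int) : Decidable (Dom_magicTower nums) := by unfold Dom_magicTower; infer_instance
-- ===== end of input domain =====

-- B is a different algorithm: a hand-rolled leftist min-heap (merge-based priority
-- queue) replaces A's repeated min()/remove() scans over the monster list.
-- (The Nat fuel arguments below are totality scaffolding only: each loop/recursion is
-- called with fuel equal to its exact iteration bound, so the fuel never runs out.)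

-- ===== PORT A =====
-- inner 'while blood < 1' loop of A; the 'none' branches are where Python's min()
-- would raise ValueError on an empty list (unreachable, since the loop only runs
-- after the 'sum(nums) < 0' guard has passed).
def popA (fuel : Nat) (count blood : Int) (monster : List Int) : Int × Int × List Int :=
  match fuel with
  | 0 => (count, blood, monster)   -- fuel = monster.length never runs out
  | fuel + 1 =>
    if blood < 1 then
      match PySem.List.min? monster (fun x => x) with
      | none => (count, blood, monster)
      | some m =>
        match PySem.List.remove? monster m with
        | none => (count, blood, monster)
        | some rest => popA fuel (count + 1) (blood - m) rest
    else (count, blood, monster)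

def magicTower (nums : List Int) : Int :=
  if nums.sum < 0 then -1
  else
    (nums.foldl
      (fun (st : Int × Int × List Int) i =>
        let monster := if i < 0 then st.2.2 ++ [i] else st.2.2
        popA monster.length st.1 (st.2.1 + i) monster)
      (0, 1, [])).1

-- ===== PORT B =====
inductive LHeap where
  | nil : LHeap
  | node : Int → Int → LHeap → LHeap → LHeap
deriving DecidableEq, Repr

def LHeap.rank : LHeap → Int
  | .nil => 0
  | .node _ r _ _ => r

def LHeap.size : LHeap → Nat
  | .nil => 0
  | .node _ _ l r => l.size + r.size + 1

-- Source B's _make: node with value v and subtrees l, m, shorter rank on the right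
def lmk (v : Int) (l m : LHeap) : LHeap :=
  if l.rank < m.rank then .node v (l.rank + 1) m l
  else .node v (m.rank + 1) l m

-- Source B's _merge (fueled; fuel = total size is an exact bound on the recursion depth)
def lmergeF : Nat → LHeap → LHeap → LHeap
  | _, .nil, b => b
  | _, a, .nil => a
  | 0, a, _ => a   -- fuel never runs out at fuel = a.size + b.size
  | fuel + 1, .node xa ra la ma, .node xb rb lb mb =>
    if xb < xa then lmk xb lb (lmergeF fuel mb (.node xa ra la ma))
    else lmk xa la (lmergeF fuel ma (.node xb rb lb mb))

def lmerge (a b : LHeap) : LHeap := lmergeF (a.size + b.size) a b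

-- inner 'while blood < 1' loop of B; the 'nil' branch is where Python's heap[0]
-- would raise TypeError (unreachable, same reason as in A).
def popB (fuel : Nat) (count blood : Int) (heap : LHeap) : Int × Int × LHeap :=
  match fuel with
  | 0 => (count, blood, heap)   -- fuel = heap.size never runs out
  | fuel + 1 =>
    if blood < 1 then
      match heap with
      | .nil => (count, blood, .nil)
      | .node x _ l m => popB fuel (count + 1) (blood - x) (lmerge l m)
    else (count, blood, heap)

def magicTower_alt (nums : List Int) : Int :=
  if nums.sum < 0 then -1
  else
    (nums.foldl
      (fun (st : Int × Int × LHeap) i =>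
        let heap := if i < 0 then lmerge st.2.2 (.node i 1 .nil .nil) else st.2.2
        popB heap.size st.1 (st.2.1 + i) heap)
      (0, 1, .nil)).1

-- ===== PRECONDITION & SPEC =====
def Spec_magicTower (nums : List Int) (out : Int) : Prop := out = magicTower_alt nums
instance (nums : List Int) (out : Int) : Decidable (Spec_magicTower nums out) := by unfold Spec_magicTower; infer_instance

-- ===== CLAIM (what is proved, stated in full; the proofs are below) =====
def Claim_equal_magicTower : Prop := ∀ (nums : List Int), Dom_magicTower nums → Spec_magicTower nums (magicTower nums)

-- ===== LEMMAS AND PROOFS =====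
def LHeap.toMS : LHeap → Multiset Int
  | .nil => 0
  | .node x _ l r => x ::ₘ (l.toMS + r.toMS)

def LHeap.Ordered : LHeap → Prop
  | .nil => True
  | .node x _ l r => (∀ y ∈ l.toMS + r.toMS, x ≤ y) ∧ l.Ordered ∧ r.Ordered

theorem card_toMS (h : LHeap) : Multiset.card h.toMS = h.size := by
  induction h with
  | nil => rfl
  | node x r l m ihl ihm => simp [LHeap.toMS, LHeap.size, ihl, ihm]

theorem size_lmk (v : Int) (l m : LHeap) : (lmk v l m).size = l.size + m.size + 1 := by
  unfold lmk; split <;> simp [LHeap.size] <;> omega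

theorem size_lmergeF (fuel : Nat) (a b : LHeap) (hf : a.size + b.size ≤ fuel) :
    (lmergeF fuel a b).size = a.size + b.size := by
  induction fuel generalizing a b with
  | zero =>
    cases a with
    | nil => simp [lmergeF, LHeap.size]
    | node xa ra la ma =>
      cases b with
      | nil => simp [lmergeF, LHeap.size]
      | node xb rb lb mb => simp [LHeap.size] at hf
  | succ fuel ih =>
    cases a with
    | nil => simp [lmergeF, LHeap.size]
    | node xa ra la ma =>
      cases b with
      | nil => simp [lmergeF, LHeap.size]
      | node xb rb lb mb =>
        simp only [lmergeF]
        simp only [LHeap.size] at hf ⊢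
        split
        · rw [size_lmk, ih mb (.node xa ra la ma) (by simp [LHeap.size]; omega)]
          simp [LHeap.size]; omega
        · rw [size_lmk, ih ma (.node xb rb lb mb) (by simp [LHeap.size]; omega)]
          simp [LHeap.size]; omega

theorem size_lmerge (a b : LHeap) : (lmerge a b).size = a.size + b.size :=
  size_lmergeF (a.size + b.size) a b le_rfl

theorem toMS_lmk (v : Int) (l m : LHeap) : (lmk v l m).toMS = v ::ₘ (l.toMS + m.toMS) := by
  unfold lmk; split <;> simp [LHeap.toMS, add_comm]

theorem toMS_lmergeF (fuel : Nat) (a b : LHeap) (hf : a.size + b.size ≤ fuel) :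
    (lmergeF fuel a b).toMS = a.toMS + b.toMS := by
  induction fuel generalizing a b with
  | zero =>
    cases a with
    | nil => simp [lmergeF, LHeap.toMS]
    | node xa ra la ma =>
      cases b with
      | nil => simp [lmergeF, LHeap.toMS]
      | node xb rb lb mb => simp [LHeap.size] at hf
  | succ fuel ih =>
    cases a with
    | nil => simp [lmergeF, LHeap.toMS]
    | node xa ra la ma =>
      cases b with
      | nil => simp [lmergeF, LHeap.toMS]
      | node xb rb lb mb =>
        simp only [lmergeF]
        simp only [LHeap.size] at hf
        split
        · rw [toMS_lmk, ih mb (.node xa ra la ma) (by simp [LHeap.size]; omega)]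
          simp only [LHeap.toMS, ← Multiset.singleton_add]
          abel
        · rw [toMS_lmk, ih ma (.node xb rb lb mb) (by simp [LHeap.size]; omega)]
          simp only [LHeap.toMS, ← Multiset.singleton_add]
          abel

theorem toMS_lmerge (a b : LHeap) : (lmerge a b).toMS = a.toMS + b.toMS :=
  toMS_lmergeF (a.size + b.size) a b le_rfl

theorem ordered_lmk (v : Int) (l m : LHeap)
    (h1 : ∀ y ∈ l.toMS, v ≤ y) (h2 : ∀ y ∈ m.toMS, v ≤ y)
    (hl : l.Ordered) (hm : m.Ordered) : (lmk v l m).Ordered := by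
  unfold lmk
  split <;> refine ⟨?_, ?_, ?_⟩ <;>
    first
    | exact hl
    | exact hm
    | · intro y hy
        rcases Multiset.mem_add.mp hy with h | h
        · first | exact h1 y h | exact h2 y h
        · first | exact h1 y h | exact h2 y h

theorem ordered_lmergeF (fuel : Nat) (a b : LHeap) (hf : a.size + b.size ≤ fuel)
    (ha : a.Ordered) (hb : b.Ordered) : (lmergeF fuel a b).Ordered := by
  induction fuel generalizing a b with
  | zero =>
    cases a with
    | nil => simpa [lmergeF] using hb
    | node xa ra la ma =>
      cases b with
      | nil => simpa [lmergeF] using ha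
      | node xb rb lb mb => simp [LHeap.size] at hf
  | succ fuel ih =>
    cases a with
    | nil => simpa [lmergeF] using hb
    | node xa ra la ma =>
      cases b with
      | nil => simpa [lmergeF] using ha
      | node xb rb lb mb =>
        obtain ⟨hax, hal, ham⟩ := ha
        obtain ⟨hbx, hbl, hbm⟩ := hb
        simp only [lmergeF]
        simp only [LHeap.size] at hf
        split
        next hlt =>
          refine ordered_lmk _ _ _ (fun y hy => hbx y (Multiset.mem_add.mpr (Or.inl hy))) ?_ hbl
            (ih mb (.node xa ra la ma) (by simp [LHeap.size]; omega) hbm ⟨hax, hal, ham⟩)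
          intro y hy
          rw [toMS_lmergeF fuel mb (.node xa ra la ma) (by simp [LHeap.size]; omega)] at hy
          rcases Multiset.mem_add.mp hy with h | h
          · exact hbx y (Multiset.mem_add.mpr (Or.inr h))
          · simp only [LHeap.toMS, Multiset.mem_cons] at h
            rcases h with h | h
            · omega
            · exact le_trans (le_of_lt hlt) (hax y h)
        next hlt =>
          refine ordered_lmk _ _ _ (fun y hy => hax y (Multiset.mem_add.mpr (Or.inl hy))) ?_ hal
            (ih ma (.node xb rb lb mb) (by simp [LHeap.size]; omega) ham ⟨hbx, hbl, hbm⟩)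
          intro y hy
          rw [toMS_lmergeF fuel ma (.node xb rb lb mb) (by simp [LHeap.size]; omega)] at hy
          rcases Multiset.mem_add.mp hy with h | h
          · exact hax y (Multiset.mem_add.mpr (Or.inr h))
          · simp only [LHeap.toMS, Multiset.mem_cons] at h
            rcases h with h | h
            · omega
            · exact le_trans (by omega : xa ≤ xb) (hbx y h)

theorem ordered_lmerge (a b : LHeap) (ha : a.Ordered) (hb : b.Ordered) :
    (lmerge a b).Ordered :=
  ordered_lmergeF (a.size + b.size) a b le_rfl ha hb

-- the Python min() of a list whose multiset is an ordered heap's is the heap's root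
theorem min?_eq_root (monster : List Int) (x r : Int) (l m : LHeap)
    (hms : (monster : Multiset Int) = (LHeap.node x r l m).toMS)
    (hord : (LHeap.node x r l m).Ordered) :
    PySem.List.min? monster (fun y => y) = some x := by
  have hxmem : x ∈ monster := by
    have : x ∈ (monster : Multiset Int) := by rw [hms]; simp [LHeap.toMS]
    simpa using this
  have hne : monster ≠ [] := by rintro rfl; simp at hxmem
  cases hv : PySem.List.min? monster (fun y => y) with
  | none => exact absurd ((PySem.List.min?_eq_none_iff monster _).mp hv) hne
  | some v =>
    have hvmem : v ∈ monster := PySem.List.min?_mem hv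
    have hxle : x ≤ v := by
      have hv' : v ∈ (monster : Multiset Int) := by simpa using hvmem
      rw [hms] at hv'
      simp only [LHeap.toMS, Multiset.mem_cons] at hv'
      rcases hv' with h | h
      · omega
      · exact hord.1 v h
    have : v = x := le_antisymm (PySem.List.min?_isMin hv x hxmem) hxle
    rw [this]

theorem popA_eq_popB (fuel : Nat) (monster : List Int) (h : LHeap) (c b : Int)
    (hlen : monster.length = fuel)
    (hms : (monster : Multiset Int) = h.toMS) (hord : h.Ordered) :
    (popA fuel c b monster).1 = (popB fuel c b h).1 ∧
    (popA fuel c b monster).2.1 = (popB fuel c b h).2.1 ∧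
    ((popA fuel c b monster).2.2 : Multiset Int) = (popB fuel c b h).2.2.toMS ∧
    (popB fuel c b h).2.2.Ordered := by
  have hsize : h.size = fuel := by
    rw [← card_toMS, ← hms]; simpa using hlen
  induction fuel generalizing monster h c b with
  | zero => exact ⟨rfl, rfl, hms, hord⟩
  | succ fuel ih =>
    simp only [popA, popB]
    by_cases hb : b < 1
    · simp only [if_pos hb]
      cases h with
      | nil => simp [LHeap.size] at hsize
      | node x r l m =>
        have hmin := min?_eq_root monster x r l m hms hord
        have hxmem : x ∈ monster := by
          have : x ∈ (monster : Multiset Int) := by rw [hms]; simp [LHeap.toMS]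
          simpa using this
        have hrem := PySem.List.remove?_eq_some_erase monster x hxmem
        rw [hmin]
        dsimp only
        rw [hrem]
        dsimp only
        have hlen' : (monster.erase x).length = fuel := by
          have := List.length_erase_of_mem hxmem; omega
        have hms' : ((monster.erase x : List Int) : Multiset Int) = (lmerge l m).toMS := by
          rw [toMS_lmerge]
          have h1 : ((monster.erase x : List Int) : Multiset Int)
              = ((monster : Multiset Int)).erase x := by simp
          rw [h1, hms]
          simp [LHeap.toMS]
        have hord' : (lmerge l m).Ordered := ordered_lmerge l m hord.2.1 hord.2.2
        exact ih (monster.erase x) (lmerge l m) (c + 1) (b - x) hlen' hms' hord'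
          (by rw [size_lmerge]; simp [LHeap.size] at hsize; omega)
    · simp only [if_neg hb]
      exact ⟨trivial, trivial, hms, hord⟩

theorem fold_eq (nums : List Int) (c b : Int) (monster : List Int) (h : LHeap)
    (hms : (monster : Multiset Int) = h.toMS) (hord : h.Ordered) :
    (nums.foldl
      (fun (st : Int × Int × List Int) i =>
        let monster := if i < 0 then st.2.2 ++ [i] else st.2.2
        popA monster.length st.1 (st.2.1 + i) monster)
      (c, b, monster)).1 =
    (nums.foldl
      (fun (st : Int × Int × LHeap) i =>
        let heap := if i < 0 then lmerge st.2.2 (.node i 1 .nil .nil) else st.2.2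
        popB heap.size st.1 (st.2.1 + i) heap)
      (c, b, h)).1 := by
  induction nums generalizing c b monster h with
  | nil => rfl
  | cons i t iht =>
    simp only [List.foldl_cons]
    have hms2 : ((if i < 0 then monster ++ [i] else monster : List Int) : Multiset Int)
        = (if i < 0 then lmerge h (.node i 1 .nil .nil) else h).toMS := by
      split
      · rw [toMS_lmerge, ← hms]
        simp only [LHeap.toMS, add_zero, ← Multiset.coe_add]
        rfl
      · exact hms
    have hord2 : (if i < 0 then lmerge h (.node i 1 .nil .nil) else h).Ordered := by
      split
      · exact ordered_lmerge _ _ hord (by simp [LHeap.Ordered, LHeap.toMS])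
      · exact hord
    have hfuel : (if i < 0 then monster ++ [i] else monster).length
        = (if i < 0 then lmerge h (.node i 1 .nil .nil) else h).size := by
      rw [← card_toMS, ← hms2]; simp
    obtain ⟨h1, h2, h3, h4⟩ := popA_eq_popB
      (if i < 0 then monster ++ [i] else monster).length
      (if i < 0 then monster ++ [i] else monster)
      (if i < 0 then lmerge h (.node i 1 .nil .nil) else h)
      c (b + i) rfl hms2 hord2
    rw [← hfuel]
    set sa := popA (if i < 0 then monster ++ [i] else monster).length c (b + i)
      (if i < 0 then monster ++ [i] else monster) with hsa
    set sb := popB (if i < 0 then monster ++ [i] else monster).length c (b + i)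
      (if i < 0 then lmerge h (.node i 1 .nil .nil) else h) with hsb
    obtain ⟨ca, ba, ma⟩ := sa
    obtain ⟨cb, bb, hb2⟩ := sb
    simp only at h1 h2 h3 h4
    subst h1 h2
    exact iht ca ba ma hb2 h3 h4

-- ===== VERDICT (by name: the statement is the Claim_ definition above) =====
theorem magicTower_spec : Claim_equal_magicTower := by
  intro nums _
  unfold Spec_magicTower magicTower magicTower_alt
  split
  · rfl
  · exact fold_eq nums 0 1 [] .nil (by simp [LHeap.toMS]) trivial
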